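-- pv_equiv track=rewrite | github.com/SonnyAgst1/PROJET_INFO | analysis/PYTHON pur/nb_médailles_athlète.py | nbr_medailles
-- ===== SOURCE A (Python) =====
-- def nbr_medailles(data, athlete_name):
--     """
--     Compte le nombre de médailles (or, argent, bronze) remportées par un athlète.
--
--     Paramètres :
--     - data : liste de dictionnaires (issue d’un fichier CSV)
--     - athlete_name : nom complet de l’athlète (str)
--
--     Retourne :
--     - Dictionnaire : {"Gold": x, "Silver": y, "Bronze": z}
--     """
--
--     resultats = {"Gold": 0, "Silver": 0, "Bronze": 0}
--
--     for ligne in data: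
--         if ligne["Name"] == athlete_name:
--             medaille = ligne["Medal"]
--             if medaille in resultats:
--                 resultats[medaille] += 1
--
--     return resultats
-- ===== SOURCE B (Python) =====
-- def nbr_medailles(data, athlete_name):
--     """Divide and conquer: split the rows in half, count each half recursively,
--     and merge the two category tables component-wise."""
--     if not data:
--         return {"Gold": 0, "Silver": 0, "Bronze": 0}
--     if len(data) == 1:
--         row = data[0]
--         if row["Name"] == athlete_name:
--             m = row["Medal"]
--             return {k: int(k == m) for k in ("Gold", "Silver", "Bronze")}
--         return {"Gold": 0, "Silver": 0, "Bronze": 0}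
--     mid = len(data) // 2
--     left = nbr_medailles(data[:mid], athlete_name)
--     right = nbr_medailles(data[mid:], athlete_name)
--     return {k: left[k] + right[k] for k in left}
-- ===== Notes on version B (the rewrite author's own statement) =====
-- stated objective: alternative
-- what changed: Replaces A's single-pass in-place dict accumulator with a divide-and-conquer recursion that splits the row list in half, counts each half independently (a one-hot table per matching row at the leaves), and merges the two tables component-wise.
import Mathlib
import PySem

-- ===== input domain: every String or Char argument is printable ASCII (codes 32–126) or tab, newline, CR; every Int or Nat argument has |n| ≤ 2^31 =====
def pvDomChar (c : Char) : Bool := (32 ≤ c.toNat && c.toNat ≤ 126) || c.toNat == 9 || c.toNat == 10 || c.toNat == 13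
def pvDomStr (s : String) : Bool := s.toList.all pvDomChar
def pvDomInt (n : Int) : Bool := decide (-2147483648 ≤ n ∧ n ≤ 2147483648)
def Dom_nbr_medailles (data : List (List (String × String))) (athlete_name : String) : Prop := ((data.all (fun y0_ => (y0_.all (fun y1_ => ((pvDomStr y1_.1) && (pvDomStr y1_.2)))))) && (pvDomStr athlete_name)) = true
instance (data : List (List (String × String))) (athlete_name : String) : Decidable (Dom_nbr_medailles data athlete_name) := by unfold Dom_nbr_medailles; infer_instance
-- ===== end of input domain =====

-- B replaces A's single-pass in-place accumulator dict with a divide-and-conquer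
-- recursion: split the rows in half, count each half, merge component-wise.

-- ligne[k] : first-match association-list lookup, totalised with ""; exact under Pre_
-- (the key is present there).
def pvGet (row : List (String × String)) (k : String) : String :=
  ((row.find? (fun p => p.1 == k)).map (·.2)).getD ""

-- ===== PORT A =====
def nbr_medailles (data : List (List (String × String))) (athlete_name : String) : List (String × Int) :=
  data.foldl (fun resultats ligne =>
    if pvGet ligne "Name" == athlete_name then
      let medaille := pvGet ligne "Medal"
      if resultats.any (fun p => p.1 == medaille) then
        resultats.map (fun p => if p.1 == medaille then (p.1, p.2 + 1) else p)
      else resultats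
    else resultats)
    [("Gold", 0), ("Silver", 0), ("Bronze", 0)]

-- ===== PORT B =====
-- data[:mid] / data[mid:] with 0 ≤ mid ≤ len(data) are exactly take/drop.
-- left[k] / right[k] in the merge comprehension: both tables carry exactly the three
-- fixed keys by construction, so the totalised lookup (getD 0) is exact.
def nbr_medailles_alt (data : List (List (String × String))) (athlete_name : String) : List (String × Int) :=
  match data with
  | [] => [("Gold", 0), ("Silver", 0), ("Bronze", 0)]
  | [row] =>
    if pvGet row "Name" == athlete_name then
      let m := pvGet row "Medal"
      [("Gold", if ("Gold" : String) == m then (1 : Int) else 0),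
       ("Silver", if ("Silver" : String) == m then (1 : Int) else 0),
       ("Bronze", if ("Bronze" : String) == m then (1 : Int) else 0)]
    else [("Gold", 0), ("Silver", 0), ("Bronze", 0)]
  | row1 :: row2 :: rest =>
    let d := row1 :: row2 :: rest
    let mid := d.length / 2
    let left := nbr_medailles_alt (d.take mid) athlete_name
    let right := nbr_medailles_alt (d.drop mid) athlete_name
    left.map (fun p => (p.1, p.2 + (((right.find? (fun q => q.1 == p.1)).map (·.2)).getD 0)))
termination_by data.length
decreasing_by
  · simp only [List.length_take, List.length_cons]; omega
  · simp only [List.length_drop, List.length_cons]; omega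

-- ===== PRECONDITION & SPEC =====
-- Pre_ excludes exactly the inputs where A raises KeyError: a row without the "Name" key,
-- or a row of the athlete without the "Medal" key.
def Pre_nbr_medailles (data : List (List (String × String))) (athlete_name : String) : Prop :=
  ∀ ligne ∈ data, (ligne.find? (fun p => p.1 == "Name")).isSome = true ∧
    (pvGet ligne "Name" = athlete_name → (ligne.find? (fun p => p.1 == "Medal")).isSome = true)
instance (data : List (List (String × String))) (athlete_name : String) : Decidable (Pre_nbr_medailles data athlete_name) := by unfold Pre_nbr_medailles; infer_instance

def pvWitness_nbr_medailles : (List (List (String × String))) × String :=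
  ([[("Name", "x"), ("Medal", "Gold")], [("Name", "y"), ("Medal", "Silver")]], "x")

def Spec_nbr_medailles (data : List (List (String × String))) (athlete_name : String) (out : List (String × Int)) : Prop := out = nbr_medailles_alt data athlete_name
instance (data : List (List (String × String))) (athlete_name : String) (out : List (String × Int)) : Decidable (Spec_nbr_medailles data athlete_name out) := by unfold Spec_nbr_medailles; infer_instance

-- ===== CLAIM =====
def Claim_equal_nbr_medailles : Prop := ∀ (data : List (List (String × String))) (athlete_name : String), Dom_nbr_medailles data athlete_name → Pre_nbr_medailles data athlete_name → Spec_nbr_medailles data athlete_name (nbr_medailles data athlete_name)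

-- ===== LEMMAS AND PROOFS =====

-- The athlete's medal labels, in row order.
def pvMeds (data : List (List (String × String))) (athlete_name : String) : List String :=
  (data.filter (fun row => pvGet row "Name" == athlete_name)).map (fun row => pvGet row "Medal")

-- A's loop body.
def pvStep (athlete_name : String) (resultats : List (String × Int)) (ligne : List (String × String)) : List (String × Int) :=
  if pvGet ligne "Name" == athlete_name then
    let medaille := pvGet ligne "Medal"
    if resultats.any (fun p => p.1 == medaille) then
      resultats.map (fun p => if p.1 == medaille then (p.1, p.2 + 1) else p)
    else resultats
  else resultats

def pvTable (data : List (List (String × String))) (athlete_name : String) : List (String × Int) :=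
  [("Gold", ((pvMeds data athlete_name).count "Gold" : Int)),
   ("Silver", ((pvMeds data athlete_name).count "Silver" : Int)),
   ("Bronze", ((pvMeds data athlete_name).count "Bronze" : Int))]

lemma pvMeds_append (athlete_name : String) (l r : List (List (String × String))) :
    pvMeds (l ++ r) athlete_name = pvMeds l athlete_name ++ pvMeds r athlete_name := by
  simp [pvMeds]

lemma foldl_step_counts (athlete_name : String) (data : List (List (String × String))) :
    ∀ (g s b : Int),
      data.foldl (pvStep athlete_name) [("Gold", g), ("Silver", s), ("Bronze", b)]
        = [("Gold", g + ((pvMeds data athlete_name).count "Gold" : Int)),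
           ("Silver", s + ((pvMeds data athlete_name).count "Silver" : Int)),
           ("Bronze", b + ((pvMeds data athlete_name).count "Bronze" : Int))] := by
  induction data with
  | nil => intro g s b; simp [pvMeds]
  | cons r t ih =>
    intro g s b
    rw [List.foldl_cons]
    by_cases hn : pvGet r "Name" = athlete_name
    · have hmeds : pvMeds (r :: t) athlete_name = pvGet r "Medal" :: pvMeds t athlete_name := by
        simp [pvMeds, List.filter_cons, hn]
      rw [hmeds]
      by_cases hg : pvGet r "Medal" = "Gold"
      · have hstep : pvStep athlete_name [("Gold", g), ("Silver", s), ("Bronze", b)] r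
            = [("Gold", g + 1), ("Silver", s), ("Bronze", b)] := by
          simp [pvStep, hn, hg]
        rw [hstep, ih]
        simp [List.count_cons, hg]
        omega
      · by_cases hs : pvGet r "Medal" = "Silver"
        · have hstep : pvStep athlete_name [("Gold", g), ("Silver", s), ("Bronze", b)] r
              = [("Gold", g), ("Silver", s + 1), ("Bronze", b)] := by
            simp [pvStep, hn, hs]
          rw [hstep, ih]
          simp [List.count_cons, hs]
          omega
        · by_cases hb : pvGet r "Medal" = "Bronze"
          · have hstep : pvStep athlete_name [("Gold", g), ("Silver", s), ("Bronze", b)] r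
                = [("Gold", g), ("Silver", s), ("Bronze", b + 1)] := by
              simp [pvStep, hn, hb]
            rw [hstep, ih]
            simp [List.count_cons, hb]
            omega
          · have hg' : ¬ ("Gold" : String) = pvGet r "Medal" := fun h => hg h.symm
            have hs' : ¬ ("Silver" : String) = pvGet r "Medal" := fun h => hs h.symm
            have hb' : ¬ ("Bronze" : String) = pvGet r "Medal" := fun h => hb h.symm
            have hstep : pvStep athlete_name [("Gold", g), ("Silver", s), ("Bronze", b)] r
                = [("Gold", g), ("Silver", s), ("Bronze", b)] := by
              simp [pvStep, hn, hg', hs', hb']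
            rw [hstep, ih]
            simp only [List.count_cons]
            simp [hg', hs', hb']
            exact ⟨hg, hs, hb⟩
    · have hmeds : pvMeds (r :: t) athlete_name = pvMeds t athlete_name := by
        simp [pvMeds, List.filter_cons, hn]
      have hstep : pvStep athlete_name [("Gold", g), ("Silver", s), ("Bronze", b)] r
          = [("Gold", g), ("Silver", s), ("Bronze", b)] := by
        simp [pvStep, hn]
      rw [hstep, ih, hmeds]

lemma onehot (m : String) :
    [(("Gold" : String), if ("Gold" : String) == m then (1 : Int) else 0),
     (("Silver" : String), if ("Silver" : String) == m then (1 : Int) else 0),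
     (("Bronze" : String), if ("Bronze" : String) == m then (1 : Int) else 0)]
      = [(("Gold" : String), (([m].count "Gold" : Nat) : Int)),
         (("Silver" : String), (([m].count "Silver" : Nat) : Int)),
         (("Bronze" : String), (([m].count "Bronze" : Nat) : Int))] := by
  by_cases h1 : m = "Gold" <;> by_cases h2 : m = "Silver" <;> by_cases h3 : m = "Bronze" <;>
    simp_all [List.count_cons] <;>
    exact ⟨fun h => h1 h.symm, fun h => h2 h.symm, fun h => h3 h.symm⟩

lemma alt_counts (data : List (List (String × String))) (athlete_name : String) :
    nbr_medailles_alt data athlete_name = pvTable data athlete_name := by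
  induction data using nbr_medailles_alt.induct athlete_name with
  | case1 => simp [nbr_medailles_alt, pvTable, pvMeds]
  | case2 row h =>
    have hn : pvGet row "Name" = athlete_name := by simpa using h
    have hmeds : pvMeds [row] athlete_name = [pvGet row "Medal"] := by
      simp [pvMeds, hn]
    rw [nbr_medailles_alt]
    simp only [h, if_true]
    rw [onehot]
    simp [pvTable, hmeds]
  | case3 row h =>
    have hn : ¬ pvGet row "Name" = athlete_name := by simpa using h
    have hmeds : pvMeds [row] athlete_name = [] := by
      simp [pvMeds, hn]
    rw [nbr_medailles_alt]
    simp only [h, if_false]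
    simp [pvTable, hmeds]
  | case4 row1 row2 rest d mid iha ihb =>
    simp only [nbr_medailles_alt]
    rw [iha, ihb]
    have hsplit : pvMeds (row1 :: row2 :: rest) athlete_name
        = pvMeds ((row1 :: row2 :: rest).take ((row1 :: row2 :: rest).length / 2)) athlete_name
          ++ pvMeds ((row1 :: row2 :: rest).drop ((row1 :: row2 :: rest).length / 2)) athlete_name := by
      rw [← pvMeds_append, List.take_append_drop]
    simp [pvTable, hsplit, List.count_append, d, mid]

-- ===== VERDICT =====
theorem nbr_medailles_spec : Claim_equal_nbr_medailles := by
  intro data athlete_name _ _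
  show nbr_medailles data athlete_name = nbr_medailles_alt data athlete_name
  have e : nbr_medailles data athlete_name
      = data.foldl (pvStep athlete_name) [("Gold", 0), ("Silver", 0), ("Bronze", 0)] := rfl
  rw [e, foldl_step_counts athlete_name data 0 0 0, alt_counts]
  simp [pvTable]
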